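-- pv_equiv track=rewrite | github.com/adinashby-vanier-college/programming-in-science-midterm-v1-malikalmasri | Midterm.py | hollow_right_triangle
-- ===== SOURCE A (Python) =====
-- def hollow_right_triangle(n):
--     space = ""
--     result = ""
--
--     if n <= 3:
--         result = "The triangle height should be at least 4."
--
--     else:
--         result = "*\n**\n"
--
--         for i in range(1, n - 2):
--             space = " " * i
--             result += "*" + space + "*\n"
--
--         result += "*" * n
--
--     return result.rstrip()
-- ===== SOURCE B (Python) =====
-- def hollow_right_triangle(n):
--     if n <= 3:
--         return "The triangle height should be at least 4."
--     # paint a 2D character canvas: blank rows first, then the borders by index assignment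
--     grid = [bytearray(b" " * (r + 1)) for r in range(n)]
--     star = ord("*")
--     for r in range(n):
--         grid[r][0] = star
--         grid[r][r] = star
--     for c in range(n):
--         grid[n - 1][c] = star
--     return b"\n".join(grid).decode("ascii").rstrip()
-- ===== Notes on version B (the rewrite author's own statement) =====
-- stated objective: alternative
-- what changed: Replaces A's sequential string concatenation (hardcoded two-row prefix, per-row space-string building, appended star row) with a 2D character-canvas algorithm: allocate blank bytearray rows, paint the left/hypotenuse borders and the bottom row by index assignment, then join and decode the canvas.
import Mathlib
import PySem

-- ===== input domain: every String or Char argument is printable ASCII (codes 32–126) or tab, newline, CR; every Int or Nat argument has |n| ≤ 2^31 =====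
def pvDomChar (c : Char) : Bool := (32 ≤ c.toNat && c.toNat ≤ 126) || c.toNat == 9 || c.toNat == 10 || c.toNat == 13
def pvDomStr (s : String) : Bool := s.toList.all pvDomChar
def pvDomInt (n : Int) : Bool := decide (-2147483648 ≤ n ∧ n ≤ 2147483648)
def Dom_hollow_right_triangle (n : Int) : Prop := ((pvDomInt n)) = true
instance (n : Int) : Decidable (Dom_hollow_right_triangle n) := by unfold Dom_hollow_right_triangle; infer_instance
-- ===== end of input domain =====

-- B replaces A's sequential string concatenation by a 2D character canvas: blank rows are
-- allocated first, the borders and bottom row painted by index assignment, then joined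
-- (objective: alternative algorithm; same cost).

-- ===== PORT A =====
def hollow_right_triangle (n : Int) : String :=
  let result : String :=
    if n ≤ 3 then "The triangle height should be at least 4."
    else
      let result0 : String := "*\n**\n"
      let result1 : String :=
        (PySem.List.pyRange 1 (n - 2) 1).foldl
          (fun result i =>
            let space := String.ofList (PySem.List.pyRepeat [' '] i)
            result ++ "*" ++ space ++ "*\n")
          result0
      result1 ++ String.ofList (PySem.List.pyRepeat ['*'] n)
  PySem.Str.rstrip result

-- ===== PORT B =====
-- grid[r][c] = ch (nested assignment; r, c are always in range here, so getD/pySetD are exact;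
-- a bytearray row of ASCII bytes is modelled as its List Char, byte b = ord of the char)
def pvSetCell (g : List (List Char)) (r c : Int) (ch : Char) : List (List Char) :=
  PySem.List.pySetD g r (PySem.List.pySetD (PySem.List.pyGetD g r []) c ch)

def hollow_right_triangle_alt (n : Int) : String :=
  if n ≤ 3 then "The triangle height should be at least 4."
  else
    let grid0 : List (List Char) :=
      (PySem.List.pyRange 0 n 1).map (fun r => PySem.List.pyRepeat [' '] (r + 1))
    let grid1 : List (List Char) :=
      (PySem.List.pyRange 0 n 1).foldl
        (fun g r => pvSetCell (pvSetCell g r 0 '*') r r '*') grid0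
    let grid2 : List (List Char) :=
      (PySem.List.pyRange 0 n 1).foldl (fun g c => pvSetCell g (n - 1) c '*') grid1
    -- "".join(row) for a row of single-character strings is the string of its characters
    PySem.Str.rstrip (PySem.Str.join "\n" (grid2.map String.ofList))

-- ===== PRECONDITION & SPEC =====
def Spec_hollow_right_triangle (n : Int) (out : String) : Prop := out = hollow_right_triangle_alt n
instance (n : Int) (out : String) : Decidable (Spec_hollow_right_triangle n out) := by unfold Spec_hollow_right_triangle; infer_instance

-- ===== CLAIM (what is proved, stated in full; the proofs are below) =====
def Claim_equal_hollow_right_triangle : Prop := ∀ (n : Int), Dom_hollow_right_triangle n → Spec_hollow_right_triangle n (hollow_right_triangle n)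

-- ===== LEMMAS AND PROOFS =====

-- the painted row r: blanks of width r+1 with both ends starred
def pvRowP (r : Nat) : List Char := ((List.replicate (r + 1) ' ').set 0 '*').set r '*'

theorem pv_set_replicate_last (j : Nat) (c x : Char) :
    (List.replicate (j + 1) c).set j x = List.replicate j c ++ [x] := by
  induction j with
  | zero => rfl
  | succ k ih =>
    rw [List.replicate_succ, List.set_cons_succ, ih, List.replicate_succ]
    simp

theorem pv_rowP_succ (k : Nat) :
    pvRowP (k + 2) = '*' :: (List.replicate (k + 1) ' ' ++ ['*']) := by
  unfold pvRowP
  rw [show k + 2 + 1 = (k + 2) + 1 from rfl, List.replicate_succ, List.set_cons_zero]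
  rw [show (('*' : Char) :: List.replicate (k + 2) ' ').set (k + 2) '*'
        = '*' :: (List.replicate (k + 2) ' ').set (k + 1) '*' from by simp,
      show k + 2 = (k + 1) + 1 from rfl, pv_set_replicate_last]

-- set on a map over range, pointwise
theorem pv_set_map_range (h : Nat → List Char) (m k : Nat) (v : List Char) :
    ((List.range m).map h).set k v
      = (List.range m).map (fun r => if r = k then v else h r) := by
  apply List.ext_getElem (by simp)
  intro i h1 h2
  simp only [List.length_map, List.length_range] at h2
  rw [List.getElem_set]
  by_cases hik : i = k
  · simp [hik]
  · simp [hik, (show k ≠ i from fun h => hik h.symm)]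

-- pass 1: each iteration rewrites only row r, so the fold is a map
theorem pv_pass1 (b : Nat → List Char) (m k : Nat)
    (hk : k ≤ m) :
    (List.range k).foldl (fun g r => g.set r (((g.getD r []).set 0 '*').set r '*'))
        ((List.range m).map b)
      = (List.range m).map (fun r => if r < k then ((b r).set 0 '*').set r '*' else b r) := by
  induction k with
  | zero => simp
  | succ j ih =>
    have hj : j ≤ m := by omega
    have hjm : j < m := by omega
    rw [List.range_succ, List.foldl_append, ih hj]
    simp only [List.foldl_cons, List.foldl_nil]
    have hget : (((List.range m).map fun r => if r < j then ((b r).set 0 '*').set r '*' else b r).getD j []) = b j := by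
      rw [List.getD_eq_getElem?_getD]
      simp [hjm]
    rw [hget, pv_set_map_range _ m j _]
    refine List.map_congr_left (fun r hr => ?_)
    rw [List.mem_range] at hr
    by_cases h1 : r = j <;> by_cases h2 : r < j <;> simp [h1, h2] <;> omega

-- one pass-1 loop body equals a single row rewrite
theorem pv_body1 (g : List (List Char)) (r : Nat) :
    pvSetCell (pvSetCell g (r : Int) 0 '*') (r : Int) (r : Int) '*'
      = g.set r (((g.getD r []).set 0 '*').set r '*') := by
  unfold pvSetCell
  have h0 : ((0 : Int)) = ((0 : Nat) : Int) := rfl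
  rw [h0]
  simp only [PySem.List.pySetD_natCast, PySem.List.pyGetD_natCast]
  by_cases hr : r < g.length
  · simp only [List.getD_eq_getElem?_getD,
      List.getElem?_set_self (by simpa using hr), Option.getD_some, List.set_set]
  · have hd : g.getD r [] = [] := by
      rw [List.getD_eq_getElem?_getD, List.getElem?_eq_none (by omega), Option.getD_none]
    rw [hd]
    simp [List.set_eq_of_length_le (show g.length ≤ r by omega)]

-- pass 2: every iteration rewrites only row j, so the fold acts inside row j
theorem pv_pass2 (cs : List Int) (g : List (List Char)) (j : Nat) (hj : j < g.length) :
    cs.foldl (fun g c => pvSetCell g (j : Int) c '*') g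
      = g.set j (cs.foldl (fun row c => PySem.List.pySetD row c '*') (g.getD j [])) := by
  induction cs generalizing g with
  | nil =>
    simp only [List.foldl_nil]
    rw [List.getD_eq_getElem?_getD, List.getElem?_eq_getElem hj, Option.getD_some,
      List.set_getElem_self]
  | cons c t ih =>
    simp only [List.foldl_cons]
    have hb : pvSetCell g (j : Int) c '*' = g.set j (PySem.List.pySetD (g.getD j []) c '*') := by
      unfold pvSetCell
      simp only [PySem.List.pySetD_natCast, PySem.List.pyGetD_natCast]
    rw [hb, ih _ (by simpa using hj)]
    simp only [List.getD_eq_getElem?_getD, List.getElem?_set_self (by simpa using hj),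
      Option.getD_some, List.set_set]

-- filling the first k cells of a row with stars
theorem pv_fill (k : Nat) (row : List Char) (hk : k ≤ row.length) :
    (List.range k).foldl (fun r c => r.set c '*') row
      = List.replicate k '*' ++ row.drop k := by
  induction k with
  | zero => simp
  | succ j ih =>
    have hj : j ≤ row.length := by omega
    rw [List.range_succ, List.foldl_append, ih hj]
    simp only [List.foldl_cons, List.foldl_nil]
    rw [List.set_append]
    simp only [List.length_replicate, lt_self_iff_false, if_false, Nat.sub_self]
    rw [List.drop_eq_getElem_cons (by omega : j < row.length), List.set_cons_zero,
      List.replicate_succ']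
    simp

-- join over a cons with nonempty tail, at the character-list level
theorem pv_cjoin_cons_ne (sep a : List Char) (parts : List (List Char)) (h : parts ≠ []) :
    PySem.Chars.join sep (a :: parts) = a ++ sep ++ PySem.Chars.join sep parts := by
  cases parts with
  | nil => exact absurd rfl h
  | cons b r => exact PySem.Chars.join_cons_cons sep a b r

theorem pv_join_cons_ne (sep a : String) (parts : List String) (h : parts ≠ []) :
    (PySem.Str.join sep (a :: parts)).toList
      = a.toList ++ sep.toList ++ (PySem.Str.join sep parts).toList := by
  cases parts with
  | nil => exact absurd rfl h
  | cons b r => simp [PySem.Chars.join_cons_cons]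

-- A's accumulating fold plus the final row equals the "\n"-join of the row list
theorem pv_fold_join (l : List Int) (acc last : String) :
    ((l.foldl
        (fun r i => r ++ "*" ++ String.ofList (PySem.List.pyRepeat [' '] i) ++ "*\n")
        acc) ++ last).toList
      = acc.toList
        ++ (PySem.Str.join "\n"
              ((l.map (fun i => "*" ++ String.ofList (PySem.List.pyRepeat [' '] i) ++ "*"))
                ++ [last])).toList := by
  induction l generalizing acc with
  | nil => simp [PySem.Chars.join_singleton]
  | cons i t ih =>
    have hne : (t.map (fun i => "*" ++ String.ofList (PySem.List.pyRepeat [' '] i) ++ "*"))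
        ++ [last] ≠ [] := by simp
    simp only [List.foldl_cons, List.map_cons, List.cons_append]
    rw [ih, pv_join_cons_ne _ _ _ hne]
    simp [List.append_assoc]

-- A's mid rows, as character lists, are B's painted rows 2 .. m-2
theorem pv_mid_rows (n : Int) (h : 4 ≤ n) :
    (PySem.List.pyRange 1 (n - 2) 1).map
        (fun i => ("*" ++ String.ofList (PySem.List.pyRepeat [' '] i) ++ "*").toList)
      = (List.range (n.toNat - 3)).map (fun k => pvRowP (k + 2)) := by
  rw [PySem.List.pyRange_one]
  have : (n - 2 - 1).toNat = n.toNat - 3 := by omega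
  rw [this, List.map_map]
  refine List.map_congr_left (fun k _ => ?_)
  have ht : ((1 : Int) + (k : Int)).toNat = k + 1 := by omega
  simp [Function.comp, pv_rowP_succ, PySem.List.pyRepeat_singleton, ht]

-- ===== VERDICT (by name: the statement is the Claim_ definition above) =====
-- the painted canvas rows, listed explicitly (first, second, interior, bottom)
theorem pv_rows (m : Nat) (hm : 4 ≤ m) :
    ((List.range m).map pvRowP).set (m - 1) (List.replicate m '*')
      = ['*'] :: ['*', '*']
          :: ((List.range (m - 3)).map (fun k => pvRowP (k + 2)) ++ [List.replicate m '*']) := by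
  obtain ⟨j, rfl⟩ : ∃ j, m = j + 4 := ⟨m - 4, by omega⟩
  have h1 : j + 4 - 1 = j + 3 := by omega
  have h3 : j + 4 - 3 = j + 1 := by omega
  rw [h1, h3, show j + 4 = (j + 3) + 1 from rfl, List.range_succ, List.map_append,
    List.set_append]
  simp only [List.length_map, List.length_range, lt_self_iff_false, if_false, Nat.sub_self,
    List.map_cons, List.set_cons_zero]
  rw [show j + 3 = (j + 1) + 1 + 1 from rfl, List.range_succ_eq_map, List.range_succ_eq_map]
  simp only [List.map_cons, List.map_map, List.cons_append]
  have e0 : pvRowP 0 = ['*'] := rfl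
  have e1 : pvRowP (Nat.succ 0) = ['*', '*'] := rfl
  have e2 : List.map (pvRowP ∘ (Nat.succ ∘ Nat.succ)) (List.range (j + 1))
      = List.map (fun k => pvRowP (k + 2)) (List.range (j + 1)) :=
    List.map_congr_left (fun k _ => rfl)
  rw [e0, e1, e2]
  simp

theorem hollow_right_triangle_spec : Claim_equal_hollow_right_triangle := by
  intro n _
  unfold Spec_hollow_right_triangle
  by_cases h : n ≤ 3
  · unfold hollow_right_triangle hollow_right_triangle_alt
    simp only [if_pos h]
    decide
  · obtain ⟨m, rfl⟩ : ∃ m : Nat, n = (m : Int) := ⟨n.toNat, by omega⟩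
    have hm : 4 ≤ m := by omega
    have hne : ¬ ((m : Int) ≤ 3) := h
    unfold hollow_right_triangle hollow_right_triangle_alt
    simp only [if_neg hne]
    refine congrArg PySem.Str.rstrip ?_
    apply String.toList_inj.mp
    -- the blank canvas
    have hg0 : (PySem.List.pyRange 0 ((m : Int)) 1).map
          (fun r => PySem.List.pyRepeat [' '] (r + 1))
        = (List.range m).map (fun r => List.replicate (r + 1) ' ') := by
      rw [PySem.List.pyRange_zero_nat, List.map_map]
      refine List.map_congr_left (fun r _ => ?_)
      simp only [Function.comp]
      rw [PySem.List.pyRepeat_singleton, show ((r : Int) + 1).toNat = r + 1 from by omega]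
    -- pass 1 paints every row's two border cells
    have hg1 : (PySem.List.pyRange 0 ((m : Int)) 1).foldl
          (fun g r => pvSetCell (pvSetCell g r 0 '*') r r '*')
          ((List.range m).map (fun r => List.replicate (r + 1) ' '))
        = (List.range m).map pvRowP := by
      rw [PySem.List.pyRange_zero_nat, List.foldl_map]
      have hb : (fun (g : List (List Char)) (r : Nat) =>
            pvSetCell (pvSetCell g (r : Int) 0 '*') (r : Int) (r : Int) '*')
          = fun g r => g.set r (((g.getD r []).set 0 '*').set r '*') := by
        funext g r
        exact pv_body1 g r
      rw [hb, pv_pass1 _ m m le_rfl]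
      refine List.map_congr_left (fun r hr => ?_)
      rw [List.mem_range] at hr
      simp [hr, pvRowP]
    -- pass 2 fills the bottom row with stars
    have hg2 : (PySem.List.pyRange 0 ((m : Int)) 1).foldl
          (fun g c => pvSetCell g ((m : Int) - 1) c '*') ((List.range m).map pvRowP)
        = ((List.range m).map pvRowP).set (m - 1) (List.replicate m '*') := by
      rw [show ((m : Int) - 1) = (((m - 1 : Nat)) : Int) from by omega]
      rw [pv_pass2 _ _ _ (by simp; omega)]
      congr 1
      have hget : ((List.range m).map pvRowP).getD (m - 1) [] = pvRowP (m - 1) := by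
        rw [List.getD_eq_getElem?_getD]
        simp [(by omega : m - 1 < m)]
      rw [hget, PySem.List.pyRange_zero_nat, List.foldl_map]
      simp only [PySem.List.pySetD_natCast]
      have hlen : (pvRowP (m - 1)).length = m := by
        simp [pvRowP]
        omega
      rw [pv_fill m (pvRowP (m - 1)) (by omega)]
      rw [List.drop_eq_nil_of_le (by omega)]
      simp
    rw [hg0, hg1, hg2, pv_rows m hm, pv_fold_join]
    -- both sides as character lists
    rw [PySem.Str.toList_join, PySem.Str.toList_join]
    simp only [List.map_map, List.map_cons, List.map_append, List.map_nil,
      Function.comp_def, String.toList_ofList]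
    have hmid : List.map
          (fun i => ("*" ++ String.ofList (PySem.List.pyRepeat [' '] i) ++ "*").toList)
          (PySem.List.pyRange 1 ((m : Int) - 2) 1)
        = (List.range (m - 3)).map (fun k => pvRowP (k + 2)) := by
      have := pv_mid_rows (m : Int) (by exact_mod_cast hm)
      simpa using this
    rw [hmid]
    rw [show PySem.List.pyRepeat ['*'] ((m : Int)) = List.replicate m '*' from by
      rw [PySem.List.pyRepeat_singleton, Int.toNat_natCast]]
    have hne2 : (List.range (m - 3)).map (fun k => pvRowP (k + 2))
        ++ [List.replicate m '*'] ≠ ([] : List (List Char)) := by simp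
    rw [pv_cjoin_cons_ne _ _ _ (by simp), pv_cjoin_cons_ne _ _ _ hne2]
    simp
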